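-- pv_equiv track=rewrite | github.com/JesperOaths/kale-nel | verify_v653_version_alignment.py | looks_like_local_asset_prefix
-- ===== SOURCE A (Python) =====
-- ASSET_EXTENSIONS = (".js", ".css", ".mjs", ".html")
--
-- def looks_like_local_asset_prefix(prefix: str) -> bool:
--     tail = prefix.rstrip()[-140:]
--     lower = tail.lower()
--     if not lower.endswith(ASSET_EXTENSIONS):
--         return False
--     start = max(tail.rfind(q) for q in ['"', "'", "(", " ", "=", ","])
--     candidate = tail[start + 1:].strip()
--     if not candidate.lower().endswith(ASSET_EXTENSIONS):
--         return False
--     return not ("://" in candidate or candidate.startswith("//"))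
-- ===== SOURCE B (Python) =====
-- ASSET_EXTENSIONS = (".js", ".css", ".mjs", ".html")
--
-- def looks_like_local_asset_prefix(prefix: str) -> bool:
--     tail = prefix.rstrip()[-140:]
--     if not tail.lower().endswith(ASSET_EXTENSIONS):
--         return False
--     # one forward pass: keep the run of characters after the last delimiter
--     acc = []
--     for ch in tail:
--         if ch in ('"', "'", "(", " ", "=", ","):
--             acc = []
--         else:
--             acc.append(ch)
--     candidate = "".join(acc).strip()
--     if not candidate.lower().endswith(ASSET_EXTENSIONS):
--         return False
--     return not ("://" in candidate or candidate.startswith("//"))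
-- ===== Notes on version B (the rewrite author's own statement) =====
-- stated objective: alternative
-- what changed: The six backward rfind scans combined with max plus a slice are replaced by one forward fold over tail that rebuilds the run of characters after the last delimiter, so no index arithmetic or repeated scans remain.
import Mathlib
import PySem

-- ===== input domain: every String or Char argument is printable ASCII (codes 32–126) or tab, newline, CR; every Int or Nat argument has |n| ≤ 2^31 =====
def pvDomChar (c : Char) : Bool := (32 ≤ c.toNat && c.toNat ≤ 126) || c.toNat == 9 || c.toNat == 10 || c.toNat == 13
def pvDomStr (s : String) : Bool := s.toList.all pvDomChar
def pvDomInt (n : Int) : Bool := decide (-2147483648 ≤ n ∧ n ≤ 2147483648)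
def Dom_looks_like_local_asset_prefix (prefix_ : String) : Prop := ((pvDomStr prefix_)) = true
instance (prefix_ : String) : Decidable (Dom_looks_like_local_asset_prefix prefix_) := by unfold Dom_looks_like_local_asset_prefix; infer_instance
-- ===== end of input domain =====

-- B replaces the six backward rfind scans + max + slice with one forward fold that rebuilds the
-- run of characters after the last delimiter (objective: alternative single-pass decomposition).

-- ===== PORT A =====
-- shared module constant: `.endswith(ASSET_EXTENSIONS)` — tuple endswith is an OR in tuple order
def pvEndswithAsset (cs : List Char) : Bool :=
  PySem.Chars.endswith cs ['.', 'j', 's'] || PySem.Chars.endswith cs ['.', 'c', 's', 's'] ||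
  PySem.Chars.endswith cs ['.', 'm', 'j', 's'] || PySem.Chars.endswith cs ['.', 'h', 't', 'm', 'l']

-- A's line `start = max(tail.rfind(q) for q in ['"', "'", "(", " ", "=", ","])`
def pvMaxR (t : List Char) : Int :=
  max (max (max (max (max
      (PySem.Chars.rfind t ['"']) (PySem.Chars.rfind t ['\'']))
      (PySem.Chars.rfind t ['('])) (PySem.Chars.rfind t [' ']))
      (PySem.Chars.rfind t ['='])) (PySem.Chars.rfind t [','])

def looks_like_local_asset_prefix (prefix_ : String) : Bool :=
  let tail := PySem.List.slice (PySem.Chars.rstrip prefix_.toList) (some (-140)) none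
  let lower := PySem.Chars.lower tail
  if !(pvEndswithAsset lower) then false
  else
    let start := pvMaxR tail
    let candidate := PySem.Chars.strip (PySem.List.slice tail (some (start + 1)) none)
    if !(pvEndswithAsset (PySem.Chars.lower candidate)) then false
    else !(PySem.Chars.isIn [':', '/', '/'] candidate || PySem.Chars.startswith candidate ['/', '/'])

-- ===== PORT B =====
def pvIsDelim (c : Char) : Bool :=
  c == '"' || c == '\'' || c == '(' || c == ' ' || c == '=' || c == ','

def looks_like_local_asset_prefix_alt (prefix_ : String) : Bool :=
  let tail := PySem.List.slice (PySem.Chars.rstrip prefix_.toList) (some (-140)) none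
  if !(pvEndswithAsset (PySem.Chars.lower tail)) then false
  else
    let acc := tail.foldl (fun acc ch => if pvIsDelim ch then [] else acc ++ [ch]) []
    let candidate := PySem.Chars.strip acc
    if !(pvEndswithAsset (PySem.Chars.lower candidate)) then false
    else !(PySem.Chars.isIn [':', '/', '/'] candidate || PySem.Chars.startswith candidate ['/', '/'])

-- ===== PRECONDITION & SPEC =====
def Spec_looks_like_local_asset_prefix (prefix_ : String) (out : Bool) : Prop := out = looks_like_local_asset_prefix_alt prefix_
instance (prefix_ : String) (out : Bool) : Decidable (Spec_looks_like_local_asset_prefix prefix_ out) := by unfold Spec_looks_like_local_asset_prefix; infer_instance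

-- ===== CLAIM (what is proved, stated in full; the proofs are below) =====
def Claim_equal_looks_like_local_asset_prefix : Prop := ∀ (prefix_ : String), Dom_looks_like_local_asset_prefix prefix_ → Spec_looks_like_local_asset_prefix prefix_ (looks_like_local_asset_prefix prefix_)

-- ===== LEMMAS AND PROOFS =====

theorem rfind_go_zero (s sub : List Char) :
    PySem.Chars.rfind.go s sub 0 = if sub.isPrefixOf s then 0 else -1 := by
  simp [PySem.Chars.rfind.go]

theorem rfind_go_succ (s sub : List Char) (j : Nat) :
    PySem.Chars.rfind.go s sub (j + 1) =
      if sub.isPrefixOf (s.drop (j + 1)) then ((j : Int) + 1) else PySem.Chars.rfind.go s sub j := by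
  simp [PySem.Chars.rfind.go]

theorem neg_one_le_rfind_go (s sub : List Char) (j : Nat) :
    -1 ≤ PySem.Chars.rfind.go s sub j := by
  induction j with
  | zero => rw [rfind_go_zero]; split <;> omega
  | succ j ih => rw [rfind_go_succ]; split <;> omega

theorem isPrefixOf_single_ne_nil (q : Char) (s : List Char) (h : List.isPrefixOf [q] s = true) :
    s ≠ [] := by
  cases s <;> simp_all [List.isPrefixOf]

theorem rfind_go_single_lt (s : List Char) (q : Char) (j : Nat) :
    PySem.Chars.rfind.go s [q] j < (s.length : Int) := by
  induction j with
  | zero =>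
    rw [rfind_go_zero]
    split
    · rename_i h
      have := isPrefixOf_single_ne_nil q s h
      have : 0 < s.length := List.length_pos_iff.mpr this
      omega
    · omega
  | succ j ih =>
    rw [rfind_go_succ]
    split
    · rename_i h
      have hne := isPrefixOf_single_ne_nil q _ h
      have : ¬ s.length ≤ j + 1 := by
        intro hle
        exact hne (List.drop_eq_nil_of_le hle)
      omega
    · exact ih

theorem rfind_single_lt (t : List Char) (q : Char) :
    PySem.Chars.rfind t [q] < (t.length : Int) := by
  unfold PySem.Chars.rfind
  exact rfind_go_single_lt t q t.length

theorem isPrefixOf_single_cons (q x : Char) (r : List Char) :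
    List.isPrefixOf [q] (x :: r) = (q == x) := by
  simp [List.isPrefixOf]

theorem rfind_go_append_single (t : List Char) (c q : Char) (j : Nat) (hj : j < t.length) :
    PySem.Chars.rfind.go (t ++ [c]) [q] j = PySem.Chars.rfind.go t [q] j := by
  induction j with
  | zero =>
    rw [rfind_go_zero, rfind_go_zero]
    cases t with
    | nil => simp at hj
    | cons x xs => simp [isPrefixOf_single_cons]
  | succ j ih =>
    rw [rfind_go_succ, rfind_go_succ]
    have hd : (t ++ [c]).drop (j + 1) = t.drop (j + 1) ++ [c] :=
      List.drop_append_of_le_length (by omega)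
    obtain ⟨y, ys, hys⟩ : ∃ y ys, t.drop (j + 1) = y :: ys := by
      have : t.drop (j + 1) ≠ [] := by
        intro hnil
        have := List.drop_eq_nil_iff.mp hnil
        omega
      cases hEq : t.drop (j + 1) with
      | nil => exact absurd hEq this
      | cons y ys => exact ⟨y, ys, rfl⟩
    rw [hd, hys]
    simp only [List.cons_append, isPrefixOf_single_cons]
    rw [ih (by omega)]

theorem rfind_append_single (t : List Char) (c q : Char) :
    PySem.Chars.rfind (t ++ [c]) [q] =
      if c = q then (t.length : Int) else PySem.Chars.rfind t [q] := by
  unfold PySem.Chars.rfind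
  have hlen : (t ++ [c]).length = t.length + 1 := by simp
  rw [hlen, rfind_go_succ]
  have hdropAll : (t ++ [c]).drop (t.length + 1) = [] :=
    List.drop_eq_nil_of_le (by simp)
  rw [hdropAll]
  simp only [List.isPrefixOf, Bool.false_eq_true, if_false]
  cases hL : t.length with
  | zero =>
    cases t with
    | cons x xs => simp at hL
    | nil =>
      rw [rfind_go_zero, rfind_go_zero]
      simp only [List.nil_append, isPrefixOf_single_cons, List.isPrefixOf]
      by_cases h : c = q
      · subst h; simp
      · have hq : (q == c) = false := by
          simp only [beq_eq_false_iff_ne, ne_eq]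
          exact fun hqc => h hqc.symm
        simp [hq, h]
  | succ m =>
    rw [rfind_go_succ (t ++ [c]) [q] m, rfind_go_succ t [q] m]
    have hdropT : t.drop (m + 1) = [] := List.drop_eq_nil_of_le (by omega)
    have hdropC : (t ++ [c]).drop (m + 1) = [c] := by
      rw [List.drop_append_of_le_length (by omega), hdropT]
      rfl
    rw [hdropC, hdropT]
    simp only [List.isPrefixOf, Bool.and_true, Bool.false_eq_true, if_false]
    by_cases h : c = q
    · subst h
      simp
    · have hq : (q == c) = false := by
        simp only [beq_eq_false_iff_ne, ne_eq]
        exact fun hqc => h hqc.symm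
      simp only [hq, Bool.false_eq_true, if_false, h]
      exact rfind_go_append_single t c q m (by omega)

theorem pvMaxR_nil : pvMaxR [] = -1 := by decide

theorem pvMaxR_append (t : List Char) (c : Char) :
    pvMaxR (t ++ [c]) = if pvIsDelim c then (t.length : Int) else pvMaxR t := by
  have b1 := rfind_single_lt t '"'
  have b2 := rfind_single_lt t '\''
  have b3 := rfind_single_lt t '('
  have b4 := rfind_single_lt t ' '
  have b5 := rfind_single_lt t '='
  have b6 := rfind_single_lt t ','
  simp only [pvMaxR, pvIsDelim, rfind_append_single]
  by_cases h1 : c = '"' <;> by_cases h2 : c = '\'' <;> by_cases h3 : c = '(' <;>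
    by_cases h4 : c = ' ' <;> by_cases h5 : c = '=' <;> by_cases h6 : c = ',' <;>
    simp_all [beq_iff_eq] <;> omega

theorem neg_one_le_pvMaxR (t : List Char) : -1 ≤ pvMaxR t := by
  have := rfind_single_lt t ','
  have h := neg_one_le_rfind_go (t) [','] t.length
  unfold pvMaxR
  have : -1 ≤ PySem.Chars.rfind t [','] := by unfold PySem.Chars.rfind; exact h
  omega

theorem pvMaxR_lt (t : List Char) : pvMaxR t < (t.length : Int) := by
  have b1 := rfind_single_lt t '"'
  have b2 := rfind_single_lt t '\''
  have b3 := rfind_single_lt t '('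
  have b4 := rfind_single_lt t ' '
  have b5 := rfind_single_lt t '='
  have b6 := rfind_single_lt t ','
  unfold pvMaxR
  omega

theorem fold_eq_drop (t : List Char) :
    t.foldl (fun acc ch => if pvIsDelim ch then [] else acc ++ [ch]) [] =
      t.drop (pvMaxR t + 1).toNat := by
  induction t using List.reverseRecOn with
  | nil => simp [pvMaxR_nil]
  | append_singleton t c ih =>
    rw [List.foldl_append]
    simp only [List.foldl_cons, List.foldl_nil]
    rw [ih, pvMaxR_append]
    by_cases hd : pvIsDelim c
    · simp only [hd, if_true]
      have h1 : ((t.length : Int) + 1).toNat = t.length + 1 := by omega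
      rw [h1]
      simp
    · simp only [hd, if_false, Bool.false_eq_true]
      have hm := pvMaxR_lt t
      have hm2 := neg_one_le_pvMaxR t
      have hle : (pvMaxR t + 1).toNat ≤ t.length := by omega
      rw [List.drop_append_of_le_length hle]

-- ===== VERDICT (by name: the statement is the Claim_ definition above) =====
theorem looks_like_local_asset_prefix_spec : Claim_equal_looks_like_local_asset_prefix := by
  intro p _
  unfold Spec_looks_like_local_asset_prefix looks_like_local_asset_prefix looks_like_local_asset_prefix_alt
  have h : ∀ t : List Char, PySem.List.slice t (some (pvMaxR t + 1)) none =
      t.foldl (fun acc ch => if pvIsDelim ch then [] else acc ++ [ch]) [] := by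
    intro t
    rw [PySem.List.slice_from t (show (0:Int) ≤ pvMaxR t + 1 by have := neg_one_le_pvMaxR t; omega),
      ← fold_eq_drop]
  simp only [h]
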